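-- pv_equiv track=rewrite | github.com/pypi-data/pypi-mirror-392 | packages/PlasmaCalcs/plasmacalcs-2025.11.0.tar.gz/plasmacalcs-2025.11.0/scripts/eppicmomentplot.py | _get_plot_titles
-- ===== SOURCE A (Python) =====
-- import math
--
-- separate_species = True  # True: one species per plot, False: all species in one plot
--
-- separate_runs = False  # True: one run per plot, False: all runs in one plot
--
-- def _get_plot_titles(all_runs, all_species, number_of_columns, title_prefix="", title_suffix=""):
--     """
--     Get plot titles
--     """
--     n_sp = len(all_species)
--     n_r = len(all_runs)
--     title_list = []
--     if separate_runs and n_r > 1: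
--         if separate_species and n_sp > 1:
--             number_of_rows = math.ceil(n_sp * n_r / number_of_columns)
--             for key in all_runs:
--                 for species in all_species:
--                     title_list.append(f"{title_prefix} {species} ({key}) {title_suffix}")
--         else:
--             number_of_rows = math.ceil(n_r / number_of_columns)
--             for key in all_runs:
--                 title_list.append(f"{title_prefix} {key} {title_suffix}")
--     else:
--         if separate_species and n_sp > 1:
--             number_of_rows = math.ceil(n_sp / number_of_columns)
--             for species in all_species:
--                 title_list.append(f"{title_prefix} {species} {title_suffix}")
--         else:
--             number_of_rows = 1
--             number_of_columns = 1
--             title_list.append(f"{title_prefix} {title_suffix}")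
--
--     # RESHAPE LIST
--     reshaped_title_list = []
--     title_counter = 0
--     for _ in range(number_of_rows):
--         temporary_list = []
--         for _ in range(number_of_columns):
--             if title_counter == len(title_list):
--                 temporary_list.append(None)
--             else:
--                 temporary_list.append(title_list[title_counter])
--                 title_counter += 1
--         reshaped_title_list.append(temporary_list)
--
--     return reshaped_title_list
-- ===== SOURCE B (Python) =====
-- import math
--
-- separate_species = True  # True: one species per plot, False: all species in one plot
--
-- separate_runs = False  # True: one run per plot, False: all runs in one plot
--
-- def _get_plot_titles(all_runs, all_species, number_of_columns, title_prefix="", title_suffix=""):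
--     """Get plot titles (chunked reshape: slice each row and pad, no running counter)."""
--     if separate_runs and len(all_runs) > 1:
--         if separate_species and len(all_species) > 1:
--             titles = [f"{title_prefix} {s} ({k}) {title_suffix}"
--                       for k in all_runs for s in all_species]
--         else:
--             titles = [f"{title_prefix} {k} {title_suffix}" for k in all_runs]
--         rows, cols = math.ceil(len(titles) / number_of_columns), number_of_columns
--     elif separate_species and len(all_species) > 1:
--         titles = [f"{title_prefix} {s} {title_suffix}" for s in all_species]
--         rows, cols = math.ceil(len(titles) / number_of_columns), number_of_columns
--     else:
--         titles, rows, cols = [f"{title_prefix} {title_suffix}"], 1, 1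
--     return [(titles[i * cols:(i + 1) * cols] + [None] * cols)[:cols]
--             for i in range(rows)]
-- ===== Notes on version B (the rewrite author's own statement) =====
-- stated objective: simpler
-- what changed: The reshape no longer walks the flat title list with a running counter and per-cell bound check: B slices each row directly as titles[i*cols:(i+1)*cols] and pads it with None to the row width, and builds the title list with comprehensions instead of append loops.
import Mathlib
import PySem

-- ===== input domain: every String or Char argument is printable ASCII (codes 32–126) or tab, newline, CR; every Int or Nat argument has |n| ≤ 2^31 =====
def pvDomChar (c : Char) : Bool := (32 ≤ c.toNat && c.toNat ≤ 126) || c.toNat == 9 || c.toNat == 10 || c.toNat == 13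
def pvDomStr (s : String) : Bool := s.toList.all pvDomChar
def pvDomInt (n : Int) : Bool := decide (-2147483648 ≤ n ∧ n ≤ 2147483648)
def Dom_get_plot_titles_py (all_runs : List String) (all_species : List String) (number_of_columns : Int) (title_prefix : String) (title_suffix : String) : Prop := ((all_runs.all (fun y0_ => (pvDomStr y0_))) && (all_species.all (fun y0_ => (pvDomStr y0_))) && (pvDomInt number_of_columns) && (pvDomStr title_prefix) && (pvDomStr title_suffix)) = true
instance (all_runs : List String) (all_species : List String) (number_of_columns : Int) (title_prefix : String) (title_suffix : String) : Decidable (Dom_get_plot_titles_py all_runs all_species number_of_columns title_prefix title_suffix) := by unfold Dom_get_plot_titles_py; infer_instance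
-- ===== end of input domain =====

-- B replaces A's stateful counter reshape by slice-and-pad row chunking (and builds the
-- title list by comprehension instead of append loops); objective: simpler, same cost.

-- module constants from the Python file
def pySep_species : Bool := true
def pySep_runs : Bool := false

-- math.ceil(a / b) on int arguments, as -((-a) // b); exact for the magnitudes admitted here
def pyCeil (a b : Int) : Int := -(PySem.Int.floordiv (-a) b)

-- ===== PORT A =====
-- one step of A's inner reshape loop body (counter check, append None or title_list[counter];
-- the index is ported as pyGet?: inside the branch the counter is always in range)
def pyStepA (title_list : List String) (st : Int × List (Option String)) :
    Int × List (Option String) :=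
  if st.1 = (title_list.length : Int) then (st.1, st.2 ++ [none])
  else (st.1 + 1, st.2 ++ [PySem.List.pyGet? title_list st.1])

-- inner reshape loop of A: for _ in range(number_of_columns)
def pyRowA (title_list : List String) (number_of_columns : Int) (st : Int × List (Option String)) :
    Int × List (Option String) :=
  (PySem.List.pyRange 0 number_of_columns 1).foldl (fun st _ => pyStepA title_list st) st

-- outer reshape loop of A: for _ in range(number_of_rows)
def pyReshapeA (title_list : List String) (number_of_rows number_of_columns : Int) :
    List (List (Option String)) :=
  ((PySem.List.pyRange 0 number_of_rows 1).foldl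
    (fun st _ =>
      let inner := pyRowA title_list number_of_columns (st.1, [])
      (inner.1, st.2 ++ [inner.2])) ((0 : Int), [])).2

def get_plot_titles_py (all_runs : List String) (all_species : List String) (number_of_columns : Int) (title_prefix : String) (title_suffix : String) : List (List (Option String)) :=
  let n_sp : Int := all_species.length
  let n_r : Int := all_runs.length
  let rct : Int × Int × List String :=
    if pySep_runs && decide (n_r > 1) then
      if pySep_species && decide (n_sp > 1) then
        (pyCeil (n_sp * n_r) number_of_columns, number_of_columns,
         all_runs.foldl (fun acc key =>
           all_species.foldl (fun acc species =>
             acc ++ [title_prefix ++ " " ++ species ++ " (" ++ key ++ ") " ++ title_suffix]) acc) [])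
      else
        (pyCeil n_r number_of_columns, number_of_columns,
         all_runs.foldl (fun acc key => acc ++ [title_prefix ++ " " ++ key ++ " " ++ title_suffix]) [])
    else
      if pySep_species && decide (n_sp > 1) then
        (pyCeil n_sp number_of_columns, number_of_columns,
         all_species.foldl (fun acc species => acc ++ [title_prefix ++ " " ++ species ++ " " ++ title_suffix]) [])
      else
        (1, 1, [title_prefix ++ " " ++ title_suffix])
  pyReshapeA rct.2.2 rct.1 rct.2.1

-- ===== PORT B =====
-- one output row of B: (titles[i*cols:(i+1)*cols] + [None]*cols)[:cols]
-- ([None]*cols and [:cols] clamp a negative cols to 0, exactly as .toNat does)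
def pyRowB (titles : List String) (cols : Int) (i : Int) : List (Option String) :=
  ((PySem.List.slice titles (some (i * cols)) (some ((i + 1) * cols))).map some
    ++ List.replicate cols.toNat (none : Option String)).take cols.toNat

def get_plot_titles_py_alt (all_runs : List String) (all_species : List String) (number_of_columns : Int) (title_prefix : String) (title_suffix : String) : List (List (Option String)) :=
  let trc : List String × Int × Int :=
    if pySep_runs && decide ((all_runs.length : Int) > 1) then
      if pySep_species && decide ((all_species.length : Int) > 1) then
        let titles := all_runs.flatMap (fun k =>
          all_species.map (fun s => title_prefix ++ " " ++ s ++ " (" ++ k ++ ") " ++ title_suffix))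
        (titles, pyCeil titles.length number_of_columns, number_of_columns)
      else
        let titles := all_runs.map (fun k => title_prefix ++ " " ++ k ++ " " ++ title_suffix)
        (titles, pyCeil titles.length number_of_columns, number_of_columns)
    else if pySep_species && decide ((all_species.length : Int) > 1) then
      let titles := all_species.map (fun s => title_prefix ++ " " ++ s ++ " " ++ title_suffix)
      (titles, pyCeil titles.length number_of_columns, number_of_columns)
    else
      ([title_prefix ++ " " ++ title_suffix], 1, 1)
  (PySem.List.pyRange 0 trc.2.1 1).map (pyRowB trc.1 trc.2.2)

-- ===== PRECONDITION & SPEC =====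
-- Pre_ excludes only the inputs where the Python A raises ZeroDivisionError:
-- two or more species together with number_of_columns == 0 (B raises there too).
def Pre_get_plot_titles_py (all_runs : List String) (all_species : List String) (number_of_columns : Int) (title_prefix : String) (title_suffix : String) : Prop :=
  all_species.length ≤ 1 ∨ number_of_columns ≠ 0
instance (all_runs : List String) (all_species : List String) (number_of_columns : Int) (title_prefix : String) (title_suffix : String) : Decidable (Pre_get_plot_titles_py all_runs all_species number_of_columns title_prefix title_suffix) := by unfold Pre_get_plot_titles_py; infer_instance

def pvWitness_get_plot_titles_py : List String × List String × Int × String × String :=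
  (["r"], ["a", "b", "c"], 2, "p", "s")

def Spec_get_plot_titles_py (all_runs : List String) (all_species : List String) (number_of_columns : Int) (title_prefix : String) (title_suffix : String) (out : List (List (Option String))) : Prop := out = get_plot_titles_py_alt all_runs all_species number_of_columns title_prefix title_suffix
instance (all_runs : List String) (all_species : List String) (number_of_columns : Int) (title_prefix : String) (title_suffix : String) (out : List (List (Option String))) : Decidable (Spec_get_plot_titles_py all_runs all_species number_of_columns title_prefix title_suffix out) := by unfold Spec_get_plot_titles_py; infer_instance

-- ===== CLAIM (what is proved, stated in full; the proofs are below) =====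
def Claim_equal_get_plot_titles_py : Prop := ∀ (all_runs : List String) (all_species : List String) (number_of_columns : Int) (title_prefix : String) (title_suffix : String), Dom_get_plot_titles_py all_runs all_species number_of_columns title_prefix title_suffix → Pre_get_plot_titles_py all_runs all_species number_of_columns title_prefix title_suffix → Spec_get_plot_titles_py all_runs all_species number_of_columns title_prefix title_suffix (get_plot_titles_py all_runs all_species number_of_columns title_prefix title_suffix)

-- ===== LEMMAS AND PROOFS =====

theorem get_plot_titles_py_witness :
    Dom_get_plot_titles_py (pvWitness_get_plot_titles_py.1) (pvWitness_get_plot_titles_py.2.1) (pvWitness_get_plot_titles_py.2.2.1) (pvWitness_get_plot_titles_py.2.2.2.1) (pvWitness_get_plot_titles_py.2.2.2.2) ∧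
    Pre_get_plot_titles_py (pvWitness_get_plot_titles_py.1) (pvWitness_get_plot_titles_py.2.1) (pvWitness_get_plot_titles_py.2.2.1) (pvWitness_get_plot_titles_py.2.2.2.1) (pvWitness_get_plot_titles_py.2.2.2.2) := by
  constructor <;> decide

-- a fold that ignores its list elements only iterates its step function
theorem foldl_const_step {α β : Type} (f : β → β) (l : List α) (b : β) :
    l.foldl (fun s _ => f s) b = f^[l.length] b := by
  induction l generalizing b with
  | nil => rfl
  | cons x xs ih => simpa [Function.iterate_succ_apply] using ih (f b)

-- the content of one output row, as both programs produce it, from counter position c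
def rowOut (ts : List String) (C c : Nat) : List (Option String) :=
  ((ts.drop c).take C).map some
    ++ List.replicate (C - (ts.length - c)) (none : Option String)

-- A's inner counter loop, characterised: chunk of the titles plus a None pad
theorem stepA_iter (ts : List String) (C : Nat) :
    ∀ (c : Nat) (acc : List (Option String)), c ≤ ts.length →
    (pyStepA ts)^[C] ((c : Int), acc)
      = (((min (c + C) ts.length : Nat) : Int), acc ++ rowOut ts C c) := by
  induction C with
  | zero =>
    intro c acc hc
    simp [rowOut, Nat.min_eq_left hc]
  | succ C ih =>
    intro c acc hc
    rw [Function.iterate_succ_apply]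
    rcases Nat.lt_or_ge c ts.length with hlt | hge
    · have hne : (c : Int) ≠ (ts.length : Int) := by exact_mod_cast Nat.ne_of_lt hlt
      have hstep : pyStepA ts ((c : Int), acc)
          = (((c + 1 : Nat) : Int), acc ++ [some ts[c]]) := by
        simp [pyStepA, hne, PySem.List.pyGet?, PySem.List.pyIdx?, hlt]
      rw [hstep, ih (c + 1) _ (by omega)]
      have hdrop : ts.drop c = ts[c] :: ts.drop (c + 1) :=
        List.drop_eq_getElem_cons hlt
      have h1 : min (c + 1 + C) ts.length = min (c + (C + 1)) ts.length := by omega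
      have hn : (C + 1) - (ts.length - c) = C - (ts.length - (c + 1)) := by omega
      have h2 : rowOut ts (C + 1) c = some ts[c] :: rowOut ts C (c + 1) := by
        rw [rowOut, rowOut, hdrop, hn, List.take_succ_cons, List.map_cons, List.cons_append]
      rw [h1, h2]
      simp
    · have hce : c = ts.length := Nat.le_antisymm hc hge
      subst hce
      have hstep : pyStepA ts ((ts.length : Int), acc)
          = ((ts.length : Int), acc ++ [none]) := by
        simp [pyStepA]
      rw [hstep, ih ts.length _ (le_refl _)]
      have h1 : min (ts.length + C) ts.length = min (ts.length + (C + 1)) ts.length := by omega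
      have h2 : rowOut ts (C + 1) ts.length = none :: rowOut ts C ts.length := by
        simp [rowOut, List.drop_length, List.replicate_succ]
      rw [h1, h2]
      simp

-- the inner loop over range(number_of_columns) is C iterations of the step
theorem rowA_eq (ts : List String) (C : Nat) (c : Nat) (acc : List (Option String))
    (hc : c ≤ ts.length) :
    pyRowA ts (C : Int) ((c : Int), acc)
      = (((min (c + C) ts.length : Nat) : Int), acc ++ rowOut ts C c) := by
  rw [pyRowA, foldl_const_step, PySem.List.length_pyRange_one]
  have : (((C : Int) - 0).toNat) = C := by omega
  rw [this, stepA_iter ts C c acc hc]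

-- A's outer loop: R rows, the counter advancing by C (clamped at the list length)
def pyStepO (ts : List String) (C : Int) (st : Int × List (List (Option String))) :
    Int × List (List (Option String)) :=
  let inner := pyRowA ts C (st.1, [])
  (inner.1, st.2 ++ [inner.2])

theorem stepO_iter (ts : List String) (C : Nat) :
    ∀ (R : Nat) (c : Nat) (acc : List (List (Option String))), c ≤ ts.length →
    ((pyStepO ts (C : Int))^[R] ((c : Int), acc)).2
      = acc ++ (List.range R).map (fun j => rowOut ts C (min (c + j * C) ts.length)) := by
  intro R
  induction R with
  | zero => intro c acc hc; simp
  | succ R ih =>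
    intro c acc hc
    rw [Function.iterate_succ_apply]
    have hstep : pyStepO ts (C : Int) ((c : Int), acc)
        = (((min (c + C) ts.length : Nat) : Int), acc ++ [rowOut ts C c]) := by
      simp [pyStepO, rowA_eq ts C c [] hc]
    rw [hstep, ih (min (c + C) ts.length) _ (Nat.min_le_right _ _)]
    rw [List.range_succ_eq_map, List.map_cons, List.map_map, List.append_assoc,
      List.singleton_append]
    congr 1
    congr 1
    · rw [Nat.zero_mul, Nat.add_zero, Nat.min_eq_left hc]
    · apply List.map_congr_left
      intro j _
      simp only [Function.comp_apply]
      congr 1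
      rw [Nat.succ_mul]
      generalize j * C = t
      omega

-- take cols of (chunk ++ cols Nones) is chunk padded with Nones up to cols
theorem chunk_pad (xs : List (Option String)) (C : Nat) (h : xs.length ≤ C) :
    (xs ++ List.replicate C (none : Option String)).take C
      = xs ++ List.replicate (C - xs.length) (none : Option String) := by
  rw [List.take_append, List.take_of_length_le h, List.take_replicate,
    Nat.min_eq_left (Nat.sub_le _ _)]

-- B's row equals the counter-loop row at counter position j*C
theorem rowB_eq (ts : List String) (C : Nat) (j : Nat) :
    pyRowB ts (C : Int) ((j : Nat) : Int) = rowOut ts C (min (j * C) ts.length) := by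
  have hcast : ((j : Int) + 1) * (C : Int) = ((j * C : Nat) : Int) + ((C : Nat) : Int) := by
    push_cast; ring
  have hmul : ((j : Int)) * (C : Int) = ((j * C : Nat) : Int) := by push_cast; ring
  have hdrop : ts.drop (min (j * C) ts.length) = ts.drop (j * C) := by
    rcases Nat.lt_or_ge ts.length (j * C) with h | h
    · rw [Nat.min_eq_right (Nat.le_of_lt h)]
      rw [List.drop_eq_nil_of_le (le_refl ts.length), List.drop_eq_nil_of_le (Nat.le_of_lt h)]
    · rw [Nat.min_eq_left h]
  have hle : (((ts.drop (j * C)).take C).map some).length ≤ C := by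
    simp only [List.length_map, List.length_take]
    exact Nat.min_le_left _ _
  rw [pyRowB, hcast, hmul, PySem.List.slice_natCast_add, Int.toNat_natCast,
    chunk_pad _ C hle, rowOut, hdrop]
  congr 2
  simp only [List.length_map, List.length_take, List.length_drop]
  omega

-- the whole reshape: A's two counter loops equal B's chunked rows (any row count R,
-- any nonnegative column count)
theorem reshape_eq (ts : List String) (R : Int) (C : Nat) :
    pyReshapeA ts R (C : Int) = (PySem.List.pyRange 0 R 1).map (pyRowB ts (C : Int)) := by
  rw [pyReshapeA]
  have hfold : ∀ (st : Int × List (List (Option String))),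
      (PySem.List.pyRange 0 R 1).foldl
        (fun st _ => let inner := pyRowA ts (C : Int) (st.1, []); (inner.1, st.2 ++ [inner.2])) st
      = (pyStepO ts (C : Int))^[(PySem.List.pyRange 0 R 1).length] st := by
    intro st
    exact foldl_const_step (pyStepO ts (C : Int)) _ st
  rw [hfold, PySem.List.length_pyRange_one]
  have := stepO_iter ts C ((R - 0).toNat) 0 [] (Nat.zero_le _)
  rw [show ((0 : Nat) : Int) = (0 : Int) by rfl] at this
  rw [this]
  rw [PySem.List.pyRange_one 0 R]
  rw [List.map_map]
  simp only [List.nil_append]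
  apply List.map_congr_left
  intro j _
  simp only [Function.comp_apply, zero_add]
  rw [rowB_eq ts C j]

-- with a negative column count and a nonnegative title count, the row count is ≤ 0
theorem ceil_nonpos_of_neg (n C : Int) (hn : 0 ≤ n) (hC : C < 0) : pyCeil n C ≤ 0 := by
  rw [pyCeil]
  have h1 : PySem.Int.floordiv (-n) C = PySem.Int.floordiv n (-C) := by
    have := PySem.Int.floordiv_neg_neg n (-C)
    simpa using this
  rw [h1]
  have hpos : 0 < -C := by omega
  rw [PySem.Int.floordiv_eq_ediv_of_pos hpos]
  have : 0 ≤ n / (-C) := Int.ediv_nonneg hn (by omega)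
  omega

-- ===== VERDICT (by name: the statement is the Claim_ definition above) =====
theorem get_plot_titles_py_spec : Claim_equal_get_plot_titles_py := by
  intro all_runs all_species C title_prefix title_suffix _hdom hpre
  unfold Spec_get_plot_titles_py get_plot_titles_py get_plot_titles_py_alt
  simp only [pySep_runs, pySep_species, Bool.false_and, Bool.true_and, if_false, Bool.false_eq_true]
  by_cases hsp : (1 : Int) < (all_species.length : Int)
  · -- more than one species: cols ≠ 0 by Pre_
    have hC : C ≠ 0 := by
      rcases hpre with h | h
      · exfalso; exact absurd (by exact_mod_cast hsp) (by omega)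
      · exact h
    simp only [decide_eq_true_eq, if_pos hsp]
    rw [PySem.List.foldl_append_singleton_eq_map
      (fun species => title_prefix ++ " " ++ species ++ " " ++ title_suffix) all_species []]
    simp only [List.nil_append, List.length_map]
    rcases lt_or_gt_of_ne hC with hneg | hposC
    · -- negative column count: ceil ≤ 0, both loops produce no rows
      have hR : pyCeil (all_species.length : Int) C ≤ 0 :=
        ceil_nonpos_of_neg _ C (by positivity) hneg
      simp only [pyReshapeA, PySem.List.pyRange_one_eq_nil hR]
      rfl
    · -- positive column count: the chunking lemma
      obtain ⟨Cn, rfl⟩ : ∃ Cn : Nat, C = (Cn : Int) := ⟨C.toNat, by omega⟩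
      exact reshape_eq _ _ Cn
  · -- at most one species: one 1×1 row
    simp only [decide_eq_true_eq, if_neg hsp]
    rfl
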